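-- pv_equiv track=rewrite | github.com/Yerin99/algorithm_python | 백준/Silver/2004. 조합 0의 개수/조합 0의 개수.py | count2
-- ===== SOURCE A (Python) =====
-- def count2(num):
--     if num < 2:
--         return 0
--
--     count = 0
--
--     while num >= 2:
--         count += num // 2
--         num //= 2
--
--     return count
-- ===== SOURCE B (Python) =====
-- def count2(num):
--     if num < 2:
--         return 0
--     # Legendre's formula collapsed: v2(n!) = n - s2(n), s2 = popcount of n
--     return num - num.bit_count()
-- ===== Notes on version B (the rewrite author's own statement) =====
-- stated objective: simpler
-- what changed: Replaces the repeated-halving accumulation loop with the loop-free closed form n - popcount(n) (Legendre's formula for the exponent of two in n!).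
import Mathlib
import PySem

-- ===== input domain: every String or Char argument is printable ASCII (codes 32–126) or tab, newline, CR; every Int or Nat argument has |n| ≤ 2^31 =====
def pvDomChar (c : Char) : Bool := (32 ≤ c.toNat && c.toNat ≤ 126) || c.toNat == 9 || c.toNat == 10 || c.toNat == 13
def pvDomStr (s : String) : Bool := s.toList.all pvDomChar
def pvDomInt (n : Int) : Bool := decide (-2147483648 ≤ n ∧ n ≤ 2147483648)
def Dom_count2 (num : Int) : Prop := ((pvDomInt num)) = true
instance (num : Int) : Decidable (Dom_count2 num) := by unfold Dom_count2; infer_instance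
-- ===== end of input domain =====

-- B replaces A's halving loop by the closed form n - popcount(n); equivalence proved for all ints.

-- ===== PORT A =====
-- while num >= 2: count += num // 2; num //= 2
def count2Loop (num count : Int) : Int :=
  if _h : 2 ≤ num then
    count2Loop (PySem.Int.floordiv num 2) (count + PySem.Int.floordiv num 2)
  else count
termination_by num.toNat
decreasing_by
  rw [PySem.Int.floordiv_eq_ediv_of_pos (by omega)]
  omega

def count2 (num : Int) : Int :=
  if num < 2 then 0 else count2Loop num 0

-- ===== PORT B =====
def count2_alt (num : Int) : Int :=
  if num < 2 then 0 else num - (PySem.Int.bitCount num : Int)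

-- ===== PRECONDITION & SPEC =====
def Spec_count2 (num : Int) (out : Int) : Prop := out = count2_alt num
instance (num : Int) (out : Int) : Decidable (Spec_count2 num out) := by unfold Spec_count2; infer_instance

-- ===== CLAIM (what is proved, stated in full; the proofs are below) =====
def Claim_equal_count2 : Prop := ∀ (num : Int), Dom_count2 num → Spec_count2 num (count2 num)

-- ===== LEMMAS AND PROOFS =====
theorem count2Loop_eq (k : Nat) :
    ∀ (n c : Int), 0 ≤ n → n.toNat ≤ k → count2Loop n c = c + n - (PySem.Int.bitCount n : Int) := by
  induction k with
  | zero =>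
    intro n c hn hk
    have hn0 : n = 0 := by omega
    subst hn0
    rw [count2Loop]
    simp [PySem.Int.bitCount_zero]
  | succ k ih =>
    intro n c hn hk
    rw [count2Loop]
    by_cases h2 : 2 ≤ n
    · simp only [h2, dif_pos]
      have hfd : PySem.Int.floordiv n 2 = n / 2 :=
        PySem.Int.floordiv_eq_ediv_of_pos (by omega)
      have hrec := ih (PySem.Int.floordiv n 2) (c + PySem.Int.floordiv n 2)
        (by rw [hfd]; omega) (by rw [hfd]; omega)
      rw [hrec]
      have hbc := PySem.Int.bitCount_of_pos (n := n) (by omega)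
      have hmod : PySem.Int.mod n 2 = n % 2 :=
        PySem.Int.mod_eq_emod_of_pos (by omega)
      rw [hbc, hmod, hfd]
      have hm : ((n % 2).toNat : Int) = n % 2 := by omega
      push_cast
      omega
    · simp only [h2, dif_neg, not_false_iff]
      have hn01 : n = 0 ∨ n = 1 := by omega
      rcases hn01 with rfl | rfl
      · have h0 : PySem.Int.bitCount 0 = 0 := by decide
        rw [h0]; omega
      · have h1 : PySem.Int.bitCount 1 = 1 := by decide
        rw [h1]; omega

-- ===== VERDICT (by name: the statement is the Claim_ definition above) =====
theorem count2_spec : Claim_equal_count2 := by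
  intro num _
  unfold Spec_count2 count2 count2_alt
  by_cases h : num < 2
  · simp [h]
  · rw [if_neg h, if_neg h]
    rw [count2Loop_eq num.toNat num 0 (by omega) (le_refl _)]
    omega
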